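-- pv_equiv track=rewrite | github.com/trevormentis-spec/OpenClawTrevorMentis | scripts/render_brief_magazine.py | wrap_paragraphs
-- ===== SOURCE A (Python) =====
-- import textwrap
--
-- def wrap_paragraphs(text: str, width: int = 500) -> str:
--     """Split text into <p> wrapped paragraphs with sub-headings inserted."""
--     paras = [p.strip() for p in text.split("\n") if p.strip()]
--     if not paras:
--         paras = textwrap.wrap(text, width) if len(text) > 100 else [text]
--
--     # If we have enough paragraphs, insert sub-headings to break up the narrative
--     if len(paras) >= 4:
--         # First paragraph is the lead — leave as-is
--         result = f"<p>{paras[0]}</p>\n"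
--         # After paragraph 2, insert "Key Developments" subheading
--         result += f"<p>{paras[1]}</p>\n" if len(paras) > 1 else ""
--         result += f"<h4 class=\"subhead-sm\">Key Developments</h4>\n"
--         result += f"<p>{paras[2]}</p>\n" if len(paras) > 2 else ""
--         # After paragraph 4, insert "Strategic Implications" subheading
--         if len(paras) > 3:
--             result += f"<p>{paras[3]}</p>\n"
--         if len(paras) > 4:
--             result += f"<h4 class=\"subhead-sm\">Strategic Implications</h4>\n"
--             result += "".join(f"<p>{p}</p>\n" for p in paras[4:])
--         return result
--
--     return "".join(f"<p>{p}</p>" for p in paras)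
-- ===== SOURCE B (Python) =====
-- import textwrap
--
-- def wrap_paragraphs(text: str, width: int = 500) -> str:
--     """Split text into <p> wrapped paragraphs with sub-headings inserted."""
--     paras = [p.strip() for p in text.split("\n") if p.strip()]
--     if not paras:
--         paras = textwrap.wrap(text, width) if len(text) > 100 else [text]
--
--     if len(paras) < 4:
--         return "".join(f"<p>{p}</p>" for p in paras)
--
--     # Position-indexed headings instead of an unrolled sequence of appends.
--     headings = {2: "Key Developments", 4: "Strategic Implications"}
--     out = []
--     for i, p in enumerate(paras):
--         if i in headings:
--             out.append(f'<h4 class="subhead-sm">{headings[i]}</h4>\n')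
--         out.append(f"<p>{p}</p>\n")
--     return "".join(out)
-- ===== Notes on version B (the rewrite author's own statement) =====
-- stated objective: simpler
-- what changed: The >=4-paragraphs branch's unrolled sequence of hardcoded index accesses and conditional appends is replaced by a single enumerate loop over the paragraphs driven by a {position: heading} dict.
import Mathlib
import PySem

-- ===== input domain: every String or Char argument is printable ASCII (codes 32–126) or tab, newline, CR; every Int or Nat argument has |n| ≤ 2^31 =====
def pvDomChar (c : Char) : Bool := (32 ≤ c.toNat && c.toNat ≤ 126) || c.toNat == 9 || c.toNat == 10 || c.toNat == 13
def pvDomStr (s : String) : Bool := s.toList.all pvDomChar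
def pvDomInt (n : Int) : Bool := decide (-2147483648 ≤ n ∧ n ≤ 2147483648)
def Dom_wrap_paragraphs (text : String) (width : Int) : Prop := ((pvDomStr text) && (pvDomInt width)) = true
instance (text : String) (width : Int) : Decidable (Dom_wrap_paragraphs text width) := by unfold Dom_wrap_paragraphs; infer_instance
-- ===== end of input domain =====

-- B replaces A's unrolled index-by-index appends in the `len(paras) >= 4` branch by one
-- position-indexed loop over enumerate(paras) with a headings dict (objective: simpler).

-- ===== PORT A =====
-- textwrap.wrap(text, width) is reached only when paras = [], i.e. text is all whitespace;
-- there (with width > 0, guaranteed by Pre_) Python finds no words and returns []; exact there.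
def pyTextwrapWrap (_text : String) (_width : Int) : List String := []

def wrap_paragraphs (text : String) (width : Int) : String :=
  let paras := (((PySem.Str.split? text "\n").getD []).map PySem.Str.strip).filter (fun p => p ≠ "")
  let paras := if paras = [] then
      (if (PySem.Str.len text : Int) > 100 then pyTextwrapWrap text width else [text])
    else paras
  if paras.length ≥ 4 then
    let result := "<p>" ++ PySem.List.pyGetD paras 0 "" ++ "</p>\n"
    let result := result ++ (if paras.length > 1 then "<p>" ++ PySem.List.pyGetD paras 1 "" ++ "</p>\n" else "")
    let result := result ++ "<h4 class=\"subhead-sm\">Key Developments</h4>\n"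
    let result := result ++ (if paras.length > 2 then "<p>" ++ PySem.List.pyGetD paras 2 "" ++ "</p>\n" else "")
    let result := if paras.length > 3 then result ++ ("<p>" ++ PySem.List.pyGetD paras 3 "" ++ "</p>\n") else result
    if paras.length > 4 then
      (result ++ "<h4 class=\"subhead-sm\">Strategic Implications</h4>\n")
        ++ PySem.Str.join "" ((PySem.List.slice paras (some 4) none).map (fun p => "<p>" ++ p ++ "</p>\n"))
    else result
  else
    PySem.Str.join "" (paras.map (fun p => "<p>" ++ p ++ "</p>"))

-- ===== PORT B =====
def wrap_paragraphs_alt (text : String) (width : Int) : String :=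
  let paras := (((PySem.Str.split? text "\n").getD []).map PySem.Str.strip).filter (fun p => p ≠ "")
  let paras := if paras = [] then
      (if (PySem.Str.len text : Int) > 100 then pyTextwrapWrap text width else [text])
    else paras
  if paras.length < 4 then
    PySem.Str.join "" (paras.map (fun p => "<p>" ++ p ++ "</p>"))
  else
    let headings : PySem.Dict Int String :=
      PySem.Dict.ofList [(2, "Key Developments"), (4, "Strategic Implications")]
    let out := (PySem.List.enumerate paras).foldl (fun out ip =>
      let out := match PySem.Dict.get? headings ip.1 with
        | some h => out ++ ["<h4 class=\"subhead-sm\">" ++ h ++ "</h4>\n"]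
        | none => out
      out ++ ["<p>" ++ ip.2 ++ "</p>\n"]) []
    PySem.Str.join "" out

-- ===== PRECONDITION & SPEC =====
-- Pre_ excludes only the inputs where A RAISES: on all-whitespace text longer than 100
-- characters with width ≤ 0, textwrap.wrap raises ValueError there.
def Pre_wrap_paragraphs (text : String) (width : Int) : Prop :=
  PySem.Str.strip text ≠ "" ∨ (PySem.Str.len text : Int) ≤ 100 ∨ 0 < width
instance (text : String) (width : Int) : Decidable (Pre_wrap_paragraphs text width) := by
  unfold Pre_wrap_paragraphs; infer_instance
def pvWitness_wrap_paragraphs : String × Int := ("a\nb", 500)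

def Spec_wrap_paragraphs (text : String) (width : Int) (out : String) : Prop := out = wrap_paragraphs_alt text width
instance (text : String) (width : Int) (out : String) : Decidable (Spec_wrap_paragraphs text width out) := by unfold Spec_wrap_paragraphs; infer_instance

-- ===== CLAIM (what is proved, stated in full; the proofs are below) =====
def Claim_equal_wrap_paragraphs : Prop := ∀ (text : String) (width : Int), Dom_wrap_paragraphs text width → Pre_wrap_paragraphs text width → Spec_wrap_paragraphs text width (wrap_paragraphs text width)

-- ===== LEMMAS AND PROOFS =====

-- tail of B's fold: once the running index is ≥ 5 no heading position is hit,
-- so the fold just appends one <p>…</p> cell per paragraph.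
theorem pv_fold_tail (rs : List String) (k : Int) (hk : 5 ≤ k) (acc : List String) :
    (PySem.List.enumerate rs k).foldl (fun out ip =>
      let out := match PySem.Dict.get? (PySem.Dict.ofList [((2 : Int), "Key Developments"), (4, "Strategic Implications")]) ip.1 with
        | some h => out ++ ["<h4 class=\"subhead-sm\">" ++ h ++ "</h4>\n"]
        | none => out
      out ++ ["<p>" ++ ip.2 ++ "</p>\n"]) acc
    = acc ++ rs.map (fun p => "<p>" ++ p ++ "</p>\n") := by
  induction rs generalizing k acc with
  | nil => simp [PySem.List.enumerate]
  | cons r rs ih =>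
    rw [PySem.List.enumerate_cons]
    simp only [List.foldl_cons]
    have h2 : PySem.Dict.get? (PySem.Dict.ofList [((2 : Int), "Key Developments"), (4, "Strategic Implications")]) k = none := by
      have hi : (PySem.Dict.ofList [((2 : Int), "Key Developments"), (4, "Strategic Implications")])
          = PySem.Dict.mk [((2 : Int), "Key Developments"), (4, "Strategic Implications")] := by rfl
      have hk2 : ¬ (2 : Int) = k := by omega
      have hk4 : ¬ (4 : Int) = k := by omega
      rw [hi, PySem.Dict.get?_mk_cons, PySem.Dict.get?_mk_cons]
      simp [PySem.Dict.get?, hk2, hk4]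
    rw [ih (k + 1) (by omega)]
    simp [h2]

-- the per-branch bodies agree on every list of paragraphs
theorem pv_body_eq (l : List String) :
    (if l.length ≥ 4 then
      let result := "<p>" ++ PySem.List.pyGetD l 0 "" ++ "</p>\n"
      let result := result ++ (if l.length > 1 then "<p>" ++ PySem.List.pyGetD l 1 "" ++ "</p>\n" else "")
      let result := result ++ "<h4 class=\"subhead-sm\">Key Developments</h4>\n"
      let result := result ++ (if l.length > 2 then "<p>" ++ PySem.List.pyGetD l 2 "" ++ "</p>\n" else "")
      let result := if l.length > 3 then result ++ ("<p>" ++ PySem.List.pyGetD l 3 "" ++ "</p>\n") else result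
      if l.length > 4 then
        (result ++ "<h4 class=\"subhead-sm\">Strategic Implications</h4>\n")
          ++ PySem.Str.join "" ((PySem.List.slice l (some 4) none).map (fun p => "<p>" ++ p ++ "</p>\n"))
      else result
    else
      PySem.Str.join "" (l.map (fun p => "<p>" ++ p ++ "</p>")))
    =
    (if l.length < 4 then
      PySem.Str.join "" (l.map (fun p => "<p>" ++ p ++ "</p>"))
    else
      PySem.Str.join "" ((PySem.List.enumerate l).foldl (fun out ip =>
        let out := match PySem.Dict.get? (PySem.Dict.ofList [((2 : Int), "Key Developments"), (4, "Strategic Implications")]) ip.1 with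
          | some h => out ++ ["<h4 class=\"subhead-sm\">" ++ h ++ "</h4>\n"]
          | none => out
        out ++ ["<p>" ++ ip.2 ++ "</p>\n"]) [])) := by
  by_cases h4 : l.length ≥ 4
  · match l, h4 with
    | p0 :: p1 :: p2 :: p3 :: rest, _ =>
      have hd0 : PySem.Dict.get? (PySem.Dict.ofList [((2 : Int), "Key Developments"), (4, "Strategic Implications")]) 0 = none := by rfl
      have hd1 : PySem.Dict.get? (PySem.Dict.ofList [((2 : Int), "Key Developments"), (4, "Strategic Implications")]) (0+1) = none := by rfl
      have hd2 : PySem.Dict.get? (PySem.Dict.ofList [((2 : Int), "Key Developments"), (4, "Strategic Implications")]) (0+1+1) = some "Key Developments" := by rfl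
      have hd3 : PySem.Dict.get? (PySem.Dict.ofList [((2 : Int), "Key Developments"), (4, "Strategic Implications")]) (0+1+1+1) = none := by rfl
      have hd4 : PySem.Dict.get? (PySem.Dict.ofList [((2 : Int), "Key Developments"), (4, "Strategic Implications")]) (0+1+1+1+1) = some "Strategic Implications" := by rfl
      have hsl : PySem.List.slice (p0 :: p1 :: p2 :: p3 :: rest) (some 4) none = rest := by
        rw [PySem.List.slice_from _ (by norm_num : (0:Int) ≤ 4)]; rfl
      rcases rest with _ | ⟨r, rs⟩
      · simp only [List.length_cons, List.length_nil, PySem.List.enumerate_cons, PySem.List.enumerate_nil,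
          List.foldl_cons, List.foldl_nil, hd0, hd1, hd2, hd3, hsl,
          PySem.List.pyGetD_ofNat', List.getD_cons_zero, List.getD_cons_succ]
        split_ifs <;> try omega
        rw [← String.toList_inj]
        simp [String.toList_append, PySem.Str.toList_join, PySem.Chars.join, List.intercalate]
      · simp only [List.length_cons, PySem.List.enumerate_cons, List.foldl_cons, hd0, hd1, hd2, hd3, hd4, hsl,
          PySem.List.pyGetD_ofNat', List.getD_cons_zero, List.getD_cons_succ]
        rw [pv_fold_tail rs (0+1+1+1+1+1) (by norm_num)]
        split_ifs <;> try omega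
        rw [← String.toList_inj]
        simp [String.toList_append, PySem.Str.toList_join, PySem.Chars.join, List.intercalate]
  · rw [if_neg h4, if_pos (by omega)]


-- ===== VERDICT (by name: the statement is the Claim_ definition above) =====
theorem wrap_paragraphs_spec : Claim_equal_wrap_paragraphs := by
  intro text width _ _
  unfold Spec_wrap_paragraphs wrap_paragraphs wrap_paragraphs_alt
  simp only []
  exact pv_body_eq _
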